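-- pv_equiv track=rewrite | github.com/Abhedhyafaujdar/Algorithm-visualizer | algo visualizer/backend.py | _quick_sort_recursive
-- ===== SOURCE A (Python) =====
-- def _partition(arr, low, high):
--     """
--     Partition generator. It yields visualization steps and, upon completion,
--     returns the final pivot index.
--     """
--     pivot_index = high
--     pivot_value = arr[pivot_index]
--     yield arr[:], (pivot_index,), f"Pivot: {pivot_value}"
--
--     i = low - 1
--     for j in range(low, high):
--         yield arr[:], (j, pivot_index), "Comparing"
--         if arr[j] <= pivot_value:
--             i += 1
--             arr[i], arr[j] = arr[j], arr[i]
--             yield arr[:], (i, j), "Swapping"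
--
--     i += 1
--     arr[i], arr[pivot_index] = arr[pivot_index], arr[i]
--     yield arr[:], (i, pivot_index), "Placing pivot"
--
--     return i  # Return the pivot index via StopIteration
--
-- def _quick_sort_recursive(arr, low, high):
--     """A recursive generator that yields steps from the quick sort process."""
--     if low < high:
--         # The partition process yields its own steps and returns the pivot index
--         partition_generator = _partition(arr, low, high)
--         pi = 0
--         while True:
--             try:
--                 yield next(partition_generator)
--             except StopIteration as e:
--                 pi = e.value  # Get return value from generator
--                 break
--
--         yield from _quick_sort_recursive(arr, low, pi - 1)
--         yield from _quick_sort_recursive(arr, pi + 1, high)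
-- ===== SOURCE B (Python) =====
-- def _swapped(xs, i, j):
--     """Return a copy of xs with positions i and j exchanged (Python index rules)."""
--     xs = xs[:]
--     xs[i], xs[j] = xs[j], xs[i]
--     return xs
--
--
-- def _partition_steps(arr, low, high):
--     """Pure partition pass: returns (steps, pivot_index, partitioned_array)
--     without mutating its argument; a while loop replaces the generator."""
--     pv = arr[high]
--     steps = [(arr[:], (high,), f"Pivot: {pv}")]
--     i = low - 1
--     j = low
--     while j < high:
--         steps.append((arr[:], (j, high), "Comparing"))
--         if arr[j] <= pv:
--             i += 1
--             arr = _swapped(arr, i, j)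
--             steps.append((arr[:], (i, j), "Swapping"))
--         j += 1
--     i += 1
--     arr = _swapped(arr, i, high)
--     steps.append((arr[:], (i, high), "Placing pivot"))
--     return steps, i, arr
--
--
-- def _quick_sort_recursive(arr, low, high):
--     """Iterative generator: an explicit LIFO stack of (low, high) ranges drives a
--     pure partition pass; the whole step list is built first, then yielded.
--     (Return-value equivalent to the recursive original; B does not mutate arr.)"""
--     out = []
--     cur = list(arr)
--     stack = [(low, high)]
--     while stack:
--         lo, hi = stack.pop()
--         if lo < hi:
--             steps, pi, cur = _partition_steps(cur, lo, hi)
--             out.extend(steps)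
--             stack.append((pi + 1, hi))
--             stack.append((lo, pi - 1))
--     yield from out
-- ===== Notes on version B (the rewrite author's own statement) =====
-- stated objective: alternative
-- what changed: The recursive generator with a manual next()/StopIteration loop over a partition generator is replaced by an iterative driver: an explicit LIFO stack of (low, high) ranges calls a pure, non-mutating partition function (a while loop returning (steps, pivot, new_array)), accumulates the whole step list, and yields it at the end; B does not mutate the caller's arr.
import Mathlib
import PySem

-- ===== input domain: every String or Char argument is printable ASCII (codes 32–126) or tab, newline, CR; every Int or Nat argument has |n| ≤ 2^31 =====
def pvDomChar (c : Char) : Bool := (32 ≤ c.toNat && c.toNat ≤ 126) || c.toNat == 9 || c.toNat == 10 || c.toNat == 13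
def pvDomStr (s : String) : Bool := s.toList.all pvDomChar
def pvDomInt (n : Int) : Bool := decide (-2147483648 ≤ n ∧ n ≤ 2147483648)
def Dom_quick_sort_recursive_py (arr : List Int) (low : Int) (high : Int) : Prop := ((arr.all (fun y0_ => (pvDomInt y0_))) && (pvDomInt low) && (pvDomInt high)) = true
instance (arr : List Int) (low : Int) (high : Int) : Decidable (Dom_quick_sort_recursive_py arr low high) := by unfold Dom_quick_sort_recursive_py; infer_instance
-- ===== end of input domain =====

-- B drives a pure, non-generator partition pass from an explicit LIFO stack of (low, high)
-- ranges and yields the prebuilt step list; return-value equivalence (B does not mutate arr).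

-- ===== PORT A =====
-- loop body of A's `_partition` generator (state = (arr, i, steps yielded so far))
def pvPartStep (high pivot_value : Int)
    (st : List Int × Int × List (List Int × List Int × String)) (j : Int) :
    List Int × Int × List (List Int × List Int × String) :=
  let arr := st.1
  let i := st.2.1
  let steps := st.2.2 ++ [(arr, [j, high], "Comparing")]
  if PySem.List.pyGetD arr j 0 ≤ pivot_value then
    let i' := i + 1
    let a := PySem.List.pyGetD arr i' 0
    let b := PySem.List.pyGetD arr j 0
    let arr' := PySem.List.pySetD (PySem.List.pySetD arr i' b) j a
    (arr', i', steps ++ [(arr', [i', j], "Swapping")])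
  else (arr, i, steps)

-- A's `_partition`: (yielded steps, returned pivot index i, arr after mutation)
def pvPartition (arr : List Int) (low : Int) (high : Int) :
    List (List Int × List Int × String) × Int × List Int :=
  let pivot_value := PySem.List.pyGetD arr high 0
  let st0 : List Int × Int × List (List Int × List Int × String) :=
    (arr, low - 1, [(arr, [high], "Pivot: " ++ PySem.Int.toStr pivot_value)])
  let st := (PySem.List.pyRange low high 1).foldl (pvPartStep high pivot_value) st0
  let i := st.2.1 + 1
  let a := PySem.List.pyGetD st.1 i 0
  let b := PySem.List.pyGetD st.1 high 0
  let arr2 := PySem.List.pySetD (PySem.List.pySetD st.1 i b) high a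
  (st.2.2 ++ [(arr2, [i, high], "Placing pivot")], i, arr2)

-- the returned pivot index lies in [low, high] (needed for termination of port A)
theorem pvStepBound (a b r : Int) (n : Nat) (h1 : b ≤ r) (h2 : r ≤ b + (n : Int))
    (hs : b = a ∨ b = a + 1) : a ≤ r ∧ r ≤ a + ((n + 1 : Nat) : Int) := by omega

theorem pvPartition_fold_bounds (l : List Int) (high pv : Int)
    (st : List Int × Int × List (List Int × List Int × String)) :
    st.2.1 ≤ (l.foldl (pvPartStep high pv) st).2.1 ∧
      (l.foldl (pvPartStep high pv) st).2.1 ≤ st.2.1 + l.length := by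
  induction l generalizing st with
  | nil => simp
  | cons x xs ih =>
    have h := ih (pvPartStep high pv st x)
    have hstep : (pvPartStep high pv st x).2.1 = st.2.1 ∨
        (pvPartStep high pv st x).2.1 = st.2.1 + 1 := by
      by_cases hc : PySem.List.pyGetD st.1 x 0 ≤ pv <;> simp [pvPartStep, hc]
    simp only [List.foldl_cons, List.length_cons]
    exact pvStepBound st.2.1 (pvPartStep high pv st x).2.1 _ xs.length h.1 h.2 hstep

theorem pvPiBound (low high x : Int) (h : low < high) (h1 : low - 1 ≤ x)
    (h2 : x ≤ low - 1 + (high - low)) : low ≤ x + 1 ∧ x + 1 ≤ high := by omega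

theorem pvPartition_pi_bounds (arr : List Int) (low high : Int) (h : low < high) :
    low ≤ (pvPartition arr low high).2.1 ∧ (pvPartition arr low high).2.1 ≤ high := by
  unfold pvPartition
  have hb := pvPartition_fold_bounds (PySem.List.pyRange low high 1) high
    (PySem.List.pyGetD arr high 0)
    (arr, low - 1, [(arr, [high], "Pivot: " ++ PySem.Int.toStr (PySem.List.pyGetD arr high 0))])
  rw [PySem.List.length_pyRange_one low high, Int.toNat_of_nonneg (by omega)] at hb
  exact pvPiBound low high _ h hb.1 hb.2

theorem pvDecL (low high pi : Int) (h : low < high) (hb : low ≤ pi ∧ pi ≤ high) :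
    (pi - 1 - low).toNat < (high - low).toNat :=
  (Int.toNat_lt_toNat (by omega)).mpr (by omega)

theorem pvDecR (low high pi : Int) (h : low < high) (hb : low ≤ pi ∧ pi ≤ high) :
    (high - (pi + 1)).toNat < (high - low).toNat :=
  (Int.toNat_lt_toNat (by omega)).mpr (by omega)

-- A's recursive driver; also returns the mutated array so the recursion can thread it
def pvQsRec (arr : List Int) (low : Int) (high : Int) :
    List (List Int × List Int × String) × List Int :=
  if h : low < high then
    let p := pvPartition arr low high
    let r1 := pvQsRec p.2.2 low (p.2.1 - 1)
    let r2 := pvQsRec r1.2 (p.2.1 + 1) high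
    (p.1 ++ r1.1 ++ r2.1, r2.2)
  else ([], arr)
termination_by (high - low).toNat
decreasing_by
  · exact pvDecL low high _ h (pvPartition_pi_bounds arr low high h)
  · exact pvDecR low high _ h (pvPartition_pi_bounds arr low high h)

def quick_sort_recursive_py (arr : List Int) (low : Int) (high : Int) :
    List (List Int × List Int × String) :=
  (pvQsRec arr low high).1

-- ===== PORT B =====
-- Source B's `_swapped`: a copy of xs with positions i and j exchanged (Python index rules)
def pvSwap (xs : List Int) (i j : Int) : List Int :=
  PySem.List.pySetD (PySem.List.pySetD xs i (PySem.List.pyGetD xs j 0)) j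
    (PySem.List.pyGetD xs i 0)

-- Source B's while loop inside `_partition_steps`: structural recursion on the remaining
-- iteration count (the fuel is exactly (high - j).toNat at every call)
def pvPartLoop (high pv : Int) : Nat → List Int → Int → Int →
    List (List Int × List Int × String) →
    List (List Int × List Int × String) × Int × List Int
  | Nat.succ n, arr, i, j, steps =>
    if PySem.List.pyGetD arr j 0 ≤ pv then
      let arr' := pvSwap arr (i + 1) j
      pvPartLoop high pv n arr' (i + 1) (j + 1)
        ((steps ++ [(arr, [j, high], "Comparing")]) ++ [(arr', [i + 1, j], "Swapping")])
    else pvPartLoop high pv n arr i (j + 1) (steps ++ [(arr, [j, high], "Comparing")])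
  | Nat.zero, arr, i, _, steps =>
    let arr2 := pvSwap arr (i + 1) high
    (steps ++ [(arr2, [i + 1, high], "Placing pivot")], i + 1, arr2)

-- Source B's `_partition_steps`
def pvPartSteps (arr : List Int) (low : Int) (high : Int) :
    List (List Int × List Int × String) × Int × List Int :=
  pvPartLoop high (PySem.List.pyGetD arr high 0) (high - low).toNat arr (low - 1) low
    [(arr, [high], "Pivot: " ++ PySem.Int.toStr (PySem.List.pyGetD arr high 0))]

-- the pivot index returned by the while loop (for termination of B's stack loop)
theorem pvPartLoop_bounds (high pv : Int) : ∀ (n : Nat) (arr : List Int) (i j : Int)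
    (steps : List (List Int × List Int × String)),
    i + 1 ≤ (pvPartLoop high pv n arr i j steps).2.1 ∧
      (pvPartLoop high pv n arr i j steps).2.1 ≤ i + 1 + n := by
  intro n
  induction n with
  | zero => intro arr i j steps; simp [pvPartLoop]
  | succ n ih =>
    intro arr i j steps
    by_cases hc : PySem.List.pyGetD arr j 0 ≤ pv
    · have h := ih (pvSwap arr (i + 1) j) (i + 1) (j + 1)
        ((steps ++ [(arr, [j, high], "Comparing")]) ++
          [(pvSwap arr (i + 1) j, [i + 1, j], "Swapping")])
      simp only [pvPartLoop, hc, if_true]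
      omega
    · have h := ih arr i (j + 1) (steps ++ [(arr, [j, high], "Comparing")])
      simp only [pvPartLoop, hc, if_false]
      omega

theorem pvPartSteps_pi_bounds (arr : List Int) (low high : Int) (h : low < high) :
    low ≤ (pvPartSteps arr low high).2.1 ∧ (pvPartSteps arr low high).2.1 ≤ high := by
  unfold pvPartSteps
  have hb := pvPartLoop_bounds high (PySem.List.pyGetD arr high 0) (high - low).toNat arr
    (low - 1) low [(arr, [high], "Pivot: " ++ PySem.Int.toStr (PySem.List.pyGetD arr high 0))]
  omega

theorem pvStackCore (a b c S : Nat) (hk : a + b + 1 = c) :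
    2 * a + 1 + (2 * b + 1 + S) < 2 * c + 1 + S := by omega

theorem pvDecStackSplit (lo hi pi : Int) (rest : List (Int × Int)) (h : lo < hi)
    (hb : lo ≤ pi ∧ pi ≤ hi) :
    (((lo, pi - 1) :: (pi + 1, hi) :: rest).map (fun q => 2 * (q.2 - q.1 + 1).toNat + 1)).sum <
      (((lo, hi) :: rest).map (fun q => 2 * (q.2 - q.1 + 1).toNat + 1)).sum := by
  simp only [List.map_cons, List.sum_cons]
  refine pvStackCore _ _ _ _ ?_
  obtain ⟨h1, h2⟩ := hb
  rw [show pi - 1 - lo + 1 = pi - lo by ring, show hi - (pi + 1) + 1 = hi - pi by ring,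
    show hi - lo + 1 = (pi - lo) + ((hi - pi) + 1) by ring,
    Int.toNat_add (by omega) (by omega), Int.toNat_add (by omega) (by omega)]
  rfl

theorem pvStackPopCore (x S : Nat) : S < 2 * x + 1 + S := by omega

theorem pvDecStackPop (lo hi : Int) (rest : List (Int × Int)) :
    (rest.map (fun q => 2 * (q.2 - q.1 + 1).toNat + 1)).sum <
      (((lo, hi) :: rest).map (fun q => 2 * (q.2 - q.1 + 1).toNat + 1)).sum := by
  simp only [List.map_cons, List.sum_cons]
  exact pvStackPopCore (hi - lo + 1).toNat _

-- Source B's while loop over the stack; list head = top of stack, `out` = steps collected so far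
def pvQsLoop (cur : List Int) (stack : List (Int × Int))
    (out : List (List Int × List Int × String)) : List (List Int × List Int × String) :=
  match stack with
  | [] => out
  | (lo, hi) :: rest =>
    if h : lo < hi then
      let p := pvPartSteps cur lo hi
      pvQsLoop p.2.2 ((lo, p.2.1 - 1) :: (p.2.1 + 1, hi) :: rest) (out ++ p.1)
    else pvQsLoop cur rest out
termination_by (stack.map (fun q => 2 * (q.2 - q.1 + 1).toNat + 1)).sum
decreasing_by
  · exact pvDecStackSplit lo hi _ rest h (pvPartSteps_pi_bounds cur lo hi h)
  · exact pvDecStackPop lo hi rest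

def quick_sort_recursive_py_alt (arr : List Int) (low : Int) (high : Int) :
    List (List Int × List Int × String) :=
  pvQsLoop arr [(low, high)] []

-- ===== PRECONDITION & SPEC =====
-- Pre_ excludes exactly the inputs on which Python A raises IndexError: a non-trivial range
-- (low < high) whose endpoints fall outside Python's index range [-len(arr), len(arr)).
def Pre_quick_sort_recursive_py (arr : List Int) (low : Int) (high : Int) : Prop :=
  high ≤ low ∨ (-(arr.length : Int) ≤ low ∧ high < (arr.length : Int))
instance (arr : List Int) (low : Int) (high : Int) : Decidable (Pre_quick_sort_recursive_py arr low high) := by unfold Pre_quick_sort_recursive_py; infer_instance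

def pvWitness_quick_sort_recursive_py : List Int × Int × Int := ([3, 1, 2], 0, 2)

def Spec_quick_sort_recursive_py (arr : List Int) (low : Int) (high : Int) (out : List (List Int × List Int × String)) : Prop := out = quick_sort_recursive_py_alt arr low high
instance (arr : List Int) (low : Int) (high : Int) (out : List (List Int × List Int × String)) : Decidable (Spec_quick_sort_recursive_py arr low high out) := by unfold Spec_quick_sort_recursive_py; infer_instance

-- ===== CLAIM =====
def Claim_equal_quick_sort_recursive_py : Prop := ∀ (arr : List Int) (low : Int) (high : Int), Dom_quick_sort_recursive_py arr low high → Pre_quick_sort_recursive_py arr low high → Spec_quick_sort_recursive_py arr low high (quick_sort_recursive_py arr low high)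

-- ===== LEMMAS AND PROOFS =====

-- B's while loop computes exactly A's fold followed by A's pivot placement
theorem pvPartLoop_eq_fold (high pv : Int) : ∀ (n : Nat) (j i : Int) (arr : List Int)
    (steps : List (List Int × List Int × String)), (high - j).toNat = n →
    pvPartLoop high pv n arr i j steps =
      (let st := (PySem.List.pyRange j high 1).foldl (pvPartStep high pv) (arr, i, steps)
       let i' := st.2.1 + 1
       let a := PySem.List.pyGetD st.1 i' 0
       let b := PySem.List.pyGetD st.1 high 0
       let arr2 := PySem.List.pySetD (PySem.List.pySetD st.1 i' b) high a
       (st.2.2 ++ [(arr2, [i', high], "Placing pivot")], i', arr2)) := by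
  intro n
  induction n with
  | zero =>
    intro j i arr steps hn
    rw [PySem.List.pyRange_one_eq_nil (by omega)]
    simp [pvPartLoop, pvSwap]
  | succ n ih =>
    intro j i arr steps hn
    have hlt : j < high := by omega
    rw [PySem.List.pyRange_one_cons hlt]
    simp only [List.foldl_cons]
    by_cases hc : PySem.List.pyGetD arr j 0 ≤ pv
    · simp only [pvPartLoop, hc, if_true]
      rw [ih (j + 1) (i + 1) _ _ (by omega)]
      simp [pvPartStep, pvSwap, hc]
    · simp only [pvPartLoop, hc, if_false]
      rw [ih (j + 1) i _ _ (by omega)]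
      simp [pvPartStep, hc]

-- hence B's pure partition pass equals A's partition generator
theorem pvPartSteps_eq (arr : List Int) (low high : Int) :
    pvPartSteps arr low high = pvPartition arr low high := by
  unfold pvPartSteps pvPartition
  rw [pvPartLoop_eq_fold high (PySem.List.pyGetD arr high 0) (high - low).toNat low (low - 1)
    arr _ rfl]

-- the stack loop on (lo, hi) :: rest appends all steps of the recursion on (lo, hi) to `out`,
-- then continues on rest from the array the recursion left behind
theorem pvQsLoop_eq_rec (n : Nat) :
    ∀ (lo hi : Int) (arr : List Int) (rest : List (Int × Int))
      (out : List (List Int × List Int × String)), (hi - lo).toNat ≤ n →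
    pvQsLoop arr ((lo, hi) :: rest) out =
      pvQsLoop (pvQsRec arr lo hi).2 rest (out ++ (pvQsRec arr lo hi).1) := by
  induction n with
  | zero =>
    intro lo hi arr rest out hn
    have hlt : ¬ lo < hi := by omega
    rw [pvQsLoop, pvQsRec]
    simp [hlt]
  | succ n ih =>
    intro lo hi arr rest out hn
    by_cases hlt : lo < hi
    · have hpi := pvPartition_pi_bounds arr lo hi hlt
      rw [pvQsLoop, pvQsRec]
      simp only [hlt, dite_true, pvPartSteps_eq]
      rw [ih lo ((pvPartition arr lo hi).2.1 - 1) _ _ _ (by omega)]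
      rw [ih ((pvPartition arr lo hi).2.1 + 1) hi _ _ _ (by omega)]
      simp [List.append_assoc]
    · rw [pvQsLoop, pvQsRec]
      simp [hlt]

-- ===== VERDICT =====
theorem quick_sort_recursive_py_spec : Claim_equal_quick_sort_recursive_py := by
  intro arr low high _ _
  unfold Spec_quick_sort_recursive_py quick_sort_recursive_py quick_sort_recursive_py_alt
  rw [pvQsLoop_eq_rec (high - low).toNat low high arr [] [] le_rfl]
  simp [pvQsLoop]
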